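-- pv_equiv track=rewrite | github.com/teaguetomesh/dqva-and-circuit-cutting | scalability/cuts_scaling.py | get_xticks
-- ===== SOURCE A (Python) =====
-- import math
--
-- def get_xticks(xvals,compulsory):
--     if len(xvals)<=10:
--         return xvals
--     else:
--         x_ticks = []
--         step = math.ceil(len(xvals)/10)
--         for idx, x in enumerate(xvals):
--             if idx%step==0 or idx==len(xvals)-1 or x in compulsory:
--                 x_ticks.append(x)
--         return x_ticks
-- ===== SOURCE B (Python) =====
-- import math
--
-- def get_xticks(xvals, compulsory):
--     n = len(xvals)
--     if n <= 10:
--         return xvals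
--     step = math.ceil(n / 10)
--     keep = set(range(0, n, step)) | {n - 1} | {i for i, x in enumerate(xvals) if x in compulsory}
--     return [xvals[i] for i in sorted(keep)]
-- ===== Notes on version B (the rewrite author's own statement) =====
-- stated objective: alternative
-- what changed: Instead of one decide-and-append scan over enumerate(xvals), B builds a keep-index set as the union of an arithmetic range (closed form for idx%step==0), the singleton {n-1} and a value-filter index set, then emits xvals[i] for i in sorted order.
import Mathlib
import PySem

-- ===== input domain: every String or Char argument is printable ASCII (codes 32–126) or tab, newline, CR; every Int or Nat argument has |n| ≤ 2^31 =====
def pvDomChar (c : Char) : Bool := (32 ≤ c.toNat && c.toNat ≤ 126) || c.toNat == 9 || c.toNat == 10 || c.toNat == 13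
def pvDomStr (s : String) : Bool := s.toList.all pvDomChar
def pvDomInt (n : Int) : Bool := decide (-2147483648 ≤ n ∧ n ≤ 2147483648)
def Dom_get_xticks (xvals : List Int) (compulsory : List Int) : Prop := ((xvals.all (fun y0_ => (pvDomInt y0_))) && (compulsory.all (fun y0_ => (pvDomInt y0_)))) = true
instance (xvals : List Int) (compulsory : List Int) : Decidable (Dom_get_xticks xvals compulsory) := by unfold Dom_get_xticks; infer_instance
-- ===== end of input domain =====

-- B rebuilds the tick list from a keep-index set (arithmetic range ∪ {n-1} ∪ value-filter indices),
-- emitted in sorted index order, instead of A's single decide-and-append scan; objective: alternative.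

-- ===== PORT A =====
-- math.ceil(len(xvals)/10): len(xvals) ≤ some machine bound, so the float ceiling is the exact
-- integer ceiling, ported as ((len + 9) / 10 : Int) (both operands nonnegative, so Lean's / is exact here).
def get_xticks (xvals : List Int) (compulsory : List Int) : List Int :=
  if xvals.length ≤ 10 then xvals
  else
    let step : Int := ((xvals.length : Int) + 9) / 10
    (PySem.List.enumerate xvals).foldl
      (fun acc p =>
        if (PySem.Int.mod p.1 step == 0 || p.1 == (xvals.length : Int) - 1
            || compulsory.contains p.2) then acc ++ [p.2] else acc) []

-- ===== PORT B =====
def get_xticks_alt (xvals : List Int) (compulsory : List Int) : List Int :=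
  let n : Int := xvals.length
  if n ≤ 10 then xvals
  else
    let step : Int := (n + 9) / 10
    let keep : PySem.Set Int :=
      PySem.Set.union
        (PySem.Set.union (PySem.Set.ofList (PySem.List.pyRange 0 n step)) [n - 1])
        (PySem.Set.ofList (((PySem.List.enumerate xvals).filter
            (fun p => compulsory.contains p.2)).map (fun p => p.1)))
    (PySem.List.sorted keep (fun i => i)).map (fun i => PySem.List.pyGetD xvals i 0)

-- ===== PRECONDITION & SPEC =====
def Spec_get_xticks (xvals : List Int) (compulsory : List Int) (out : List Int) : Prop := out = get_xticks_alt xvals compulsory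
instance (xvals : List Int) (compulsory : List Int) (out : List Int) : Decidable (Spec_get_xticks xvals compulsory out) := by unfold Spec_get_xticks; infer_instance

-- ===== CLAIM (what is proved, stated in full; the proofs are below) =====
def Claim_equal_get_xticks : Prop := ∀ (xvals : List Int) (compulsory : List Int), Dom_get_xticks xvals compulsory → Spec_get_xticks xvals compulsory (get_xticks xvals compulsory)

-- ===== LEMMAS AND PROOFS =====


theorem xticks_core (xvals compulsory : List Int) (step : Int) (hs : 0 < step)
    (hlen : 1 ≤ xvals.length) :
    (PySem.List.enumerate xvals).foldl
      (fun acc p =>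
        if (PySem.Int.mod p.1 step == 0 || p.1 == (xvals.length : Int) - 1
            || compulsory.contains p.2) then acc ++ [p.2] else acc) []
    = (PySem.List.sorted
        (PySem.Set.union
          (PySem.Set.union
            (PySem.Set.ofList (PySem.List.pyRange 0 (xvals.length : Int) step))
            [(xvals.length : Int) - 1])
          (PySem.Set.ofList (((PySem.List.enumerate xvals).filter
              (fun p => compulsory.contains p.2)).map (fun p => p.1))))
        (fun i => i)).map (fun i => PySem.List.pyGetD xvals i 0) := by
  set n : Int := (xvals.length : Int) with hn
  have hn1 : 1 ≤ n := by simp [hn]; omega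
  set R : List Int := PySem.List.pyRange 0 n with hRdef
  set g : Int → Int × Int := fun j => (j, PySem.List.pyGetD xvals j 0) with hg
  have henum : PySem.List.enumerate xvals = R.map g := by
    rw [PySem.List.enumerate_eq_map_pyRange xvals 0]
    simp [hRdef, hn, hg, PySem.List.len_eq]
  set Kf : List Int := ((PySem.List.enumerate xvals).filter
      (fun p => compulsory.contains p.2)).map (fun p => p.1) with hKf
  have hKf' : Kf = R.filter (fun a => compulsory.contains (PySem.List.pyGetD xvals a 0)) := by
    rw [hKf, henum, List.filter_map, List.map_map]
    simp [hg, Function.comp_def]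
  set keep : List Int :=
    PySem.Set.union
      (PySem.Set.union (PySem.Set.ofList (PySem.List.pyRange 0 n step)) [n - 1])
      (PySem.Set.ofList Kf) with hkeep
  have hmemR : ∀ a : Int, a ∈ R ↔ 0 ≤ a ∧ a < n := by
    intro a; rw [hRdef, PySem.List.mem_pyRange_one]
  have hmemkeep : ∀ a : Int, a ∈ keep ↔
      ((0 ≤ a ∧ a < n) ∧ step ∣ a) ∨ a = n - 1 ∨
      (a ∈ R ∧ compulsory.contains (PySem.List.pyGetD xvals a 0) = true) := by
    intro a
    rw [hkeep, PySem.Set.mem_union, PySem.Set.mem_union, PySem.Set.mem_ofList,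
      PySem.Set.mem_ofList, hKf', List.mem_filter,
      PySem.List.mem_pyRange_iff_of_pos hs, List.mem_singleton]
    constructor
    · rintro ((⟨h1, h2, h3⟩ | h) | h)
      · exact Or.inl ⟨⟨h1, h2⟩, by simpa using h3⟩
      · exact Or.inr (Or.inl h)
      · exact Or.inr (Or.inr h)
    · rintro (⟨⟨h1, h2⟩, h3⟩ | h | h)
      · exact Or.inl (Or.inl ⟨h1, h2, by simpa using h3⟩)
      · exact Or.inl (Or.inr h)
      · exact Or.inr h
  have hkeepss : ∀ a ∈ keep, a ∈ R := by
    intro a ha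
    rcases (hmemkeep a).1 ha with ⟨⟨h1, h2⟩, _⟩ | h | ⟨h, _⟩
    · exact (hmemR a).2 ⟨h1, h2⟩
    · exact (hmemR a).2 (by constructor <;> omega)
    · exact h
  have hnodupkeep : keep.Nodup :=
    PySem.Set.nodup_union _ _ (PySem.Set.nodup_union _ _ (PySem.Set.nodup_ofList _))
  have hperm : (R.filter (fun a => decide (a ∈ keep))).Perm keep := by
    rw [List.perm_ext_iff_of_nodup
      ((PySem.List.nodup_pyRange_one 0 n).filter _) hnodupkeep]
    intro a
    simp only [List.mem_filter, decide_eq_true_eq]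
    exact ⟨fun h => h.2, fun h => ⟨hkeepss a h, h⟩⟩
  have hpair : (R.filter (fun a => decide (a ∈ keep))).Pairwise (fun a b => a < b) :=
    (PySem.List.pairwise_lt_pyRange_one 0 n).filter _
  have hcond : ∀ x ∈ R,
      ((fun p : Int × Int => (PySem.Int.mod p.1 step == 0 || p.1 == n - 1
          || compulsory.contains p.2)) ∘ g) x = (fun a => decide (a ∈ keep)) x := by
    intro a ha
    rcases (hmemR a).1 ha with ⟨ha0, ha1⟩
    rw [Bool.eq_iff_iff]
    simp only [Function.comp_def, hg, Bool.or_eq_true, beq_iff_eq, decide_eq_true_eq,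
      List.contains_eq_mem, hmemkeep a, PySem.Int.mod_eq_zero_iff_dvd]
    constructor
    · rintro ((h | h) | h)
      · exact Or.inl ⟨⟨ha0, ha1⟩, h⟩
      · exact Or.inr (Or.inl h)
      · exact Or.inr (Or.inr ⟨ha, h⟩)
    · rintro (⟨_, h3⟩ | h | ⟨_, h⟩)
      · exact Or.inl (Or.inl h3)
      · exact Or.inl (Or.inr h)
      · exact Or.inr h
  rw [henum, PySem.List.foldl_append_if, List.filter_map, List.nil_append, List.map_map,
    PySem.List.sorted_eq_of_perm_of_pairwise_lt _ _ _ hperm hpair,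
    List.filter_congr hcond]
  rfl

theorem get_xticks_main : ∀ (xvals : List Int) (compulsory : List Int),
    get_xticks xvals compulsory = get_xticks_alt xvals compulsory := by
  intro xvals compulsory
  unfold get_xticks get_xticks_alt
  by_cases h : xvals.length ≤ 10
  · simp [h]
  · have h' : ¬ ((xvals.length : Int) ≤ 10) := by exact_mod_cast h
    simp only [if_neg h, if_neg h']
    exact xticks_core xvals compulsory _ (by omega) (by omega)

-- ===== VERDICT (by name: the statement is the Claim_ definition above) =====
theorem get_xticks_spec : Claim_equal_get_xticks := by
  intro xvals compulsory _
  exact get_xticks_main xvals compulsory
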